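-- pv_equiv track=rewrite | github.com/Cyril27/Master_thesis | code/MLspike/decon_spikes.py | apply_offset
-- ===== SOURCE A (Python) =====
-- def apply_offset(lst, offset, list2):
--     max_val = max(lst)
--     end_list = [x + offset for x in lst]
--     begin_list = []
--
--     for element in end_list[:]:  # Iterate over a copy of end_list to avoid modifying it
--         if element > max_val:
--             end_list.remove(element)
--             begin_list.append(element - max_val)
--
--     end_list2 = list2[:len(end_list)]
--     begin_list2 = list2[len(end_list):]
--
--     return begin_list + end_list, begin_list2 + end_list2
-- ===== SOURCE B (Python) =====
-- def apply_offset(lst, offset, list2):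
--     m = max(lst)
--     begin = []
--     end = []
--     for x in lst:
--         y = x + offset
--         if y > m:
--             begin.append(y - m)
--         else:
--             end.append(y)
--     k = len(end)
--     return begin + end, list2[k:] + list2[:k]
-- ===== Notes on version B (the rewrite author's own statement) =====
-- stated objective: faster
-- what changed: Replaces the list-copying pass with repeated list.remove (quadratic) by a single-pass stable partition appending each shifted element to either the begin or the end list.
import Mathlib
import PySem

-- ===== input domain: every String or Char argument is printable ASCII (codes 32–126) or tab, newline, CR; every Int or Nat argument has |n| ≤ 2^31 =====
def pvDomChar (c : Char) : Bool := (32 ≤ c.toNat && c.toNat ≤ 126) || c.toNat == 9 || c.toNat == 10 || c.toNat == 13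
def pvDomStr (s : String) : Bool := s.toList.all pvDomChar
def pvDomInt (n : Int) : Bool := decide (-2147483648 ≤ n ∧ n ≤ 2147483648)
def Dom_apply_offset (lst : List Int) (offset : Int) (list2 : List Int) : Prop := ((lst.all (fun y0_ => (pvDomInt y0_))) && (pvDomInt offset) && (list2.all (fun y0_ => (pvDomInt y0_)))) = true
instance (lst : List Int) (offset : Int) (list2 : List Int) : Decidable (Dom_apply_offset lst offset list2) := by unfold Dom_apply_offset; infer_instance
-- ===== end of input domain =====

-- B replaces A's copy-and-repeated-list.remove loop by a single-pass stable partition (faster: asymptotic, O(n) vs O(n^2); same return value).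

-- ===== PORT A =====
-- A's loop iterates over a copy of end_list, mutating (end_list, begin_list); ported as a fold over the copy.
-- list2[:k] / list2[k:] with k = len(end_list) ≥ 0 are exactly take/drop.
def apply_offset (lst : List Int) (offset : Int) (list2 : List Int) : List Int × List Int :=
  let max_val : Int := (PySem.List.max? lst (fun x => x)).getD 0   -- max(lst); none (empty lst, ValueError) excluded by Pre_
  let end_list0 := lst.map (fun x => x + offset)
  let st := end_list0.foldl (fun (st : List Int × List Int) element =>
      if element > max_val then
        ((PySem.List.remove? st.1 element).getD st.1, st.2 ++ [element - max_val])
      else st) (end_list0, [])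
  let end_list := st.1
  let begin_list := st.2
  let end_list2 := list2.take end_list.length
  let begin_list2 := list2.drop end_list.length
  (begin_list ++ end_list, begin_list2 ++ end_list2)

-- ===== PORT B =====
def apply_offset_alt (lst : List Int) (offset : Int) (list2 : List Int) : List Int × List Int :=
  let m : Int := (PySem.List.max? lst (fun x => x)).getD 0
  let st := lst.foldl (fun (st : List Int × List Int) x =>
      let y := x + offset
      if y > m then (st.1 ++ [y - m], st.2) else (st.1, st.2 ++ [y])) ([], [])
  let k := st.2.length
  (st.1 ++ st.2, list2.drop k ++ list2.take k)

-- ===== PRECONDITION & SPEC =====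
-- max([]) raises ValueError in A, and B raises there too: the empty list is excluded.
def Pre_apply_offset (lst : List Int) (_offset : Int) (_list2 : List Int) : Prop := lst ≠ []
instance (lst : List Int) (offset : Int) (list2 : List Int) : Decidable (Pre_apply_offset lst offset list2) := by unfold Pre_apply_offset; infer_instance
def pvWitness_apply_offset : List Int × Int × List Int := ([1, 5, 3], 4, [10, 20, 30])
def Spec_apply_offset (lst : List Int) (offset : Int) (list2 : List Int) (out : List Int × List Int) : Prop := out = apply_offset_alt lst offset list2
instance (lst : List Int) (offset : Int) (list2 : List Int) (out : List Int × List Int) : Decidable (Spec_apply_offset lst offset list2 out) := by unfold Spec_apply_offset; infer_instance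

-- ===== CLAIM (what is proved, stated in full; the proofs are below) =====
def Claim_equal_apply_offset : Prop := ∀ (lst : List Int) (offset : Int) (list2 : List Int), Dom_apply_offset lst offset list2 → Pre_apply_offset lst offset list2 → Spec_apply_offset lst offset list2 (apply_offset lst offset list2)

-- ===== LEMMAS AND PROOFS =====

-- removing v from pref ++ v :: r removes that occurrence when nothing in pref equals v
theorem remove_append_cons (pref r : List Int) (v : Int) (h : ∀ y ∈ pref, y ≠ v) :
    PySem.List.remove? (pref ++ v :: r) v = some (pref ++ r) := by
  induction pref with
  | nil => simp [PySem.List.remove?_cons_self]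
  | cons a t ih =>
      have ha : a ≠ v := h a (by simp)
      rw [List.cons_append, PySem.List.remove?_cons_of_ne _ ha,
        ih (fun y hy => h y (by simp [hy]))]
      rfl

-- invariant for A's loop: processing r with end_list = pref ++ r (pref all ≤ max) partitions r stably
theorem loopA_inv (m : Int) (r : List Int) : ∀ (pref b : List Int), (∀ y ∈ pref, ¬ y > m) →
    r.foldl (fun (st : List Int × List Int) element =>
      if element > m then
        ((PySem.List.remove? st.1 element).getD st.1, st.2 ++ [element - m])
      else st) (pref ++ r, b)
    = (pref ++ r.filter (fun y => ¬ y > m), b ++ (r.filter (fun y => y > m)).map (fun y => y - m)) := by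
  induction r with
  | nil => intro pref b _; simp
  | cons x r ih =>
      intro pref b h
      by_cases hx : x > m
      · have hrem : PySem.List.remove? (pref ++ x :: r) x = some (pref ++ r) :=
          remove_append_cons pref r x (fun y hy => by
            have := h y hy; intro he; exact this (he ▸ hx))
        simp only [List.foldl_cons, if_pos hx, hrem, Option.getD_some]
        rw [ih pref (b ++ [x - m]) h]
        simp [hx]
      · simp only [List.foldl_cons, if_neg hx]
        have : pref ++ x :: r = (pref ++ [x]) ++ r := by simp
        rw [this, ih (pref ++ [x]) b (by
          intro y hy
          rcases List.mem_append.mp hy with h1 | h1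
          · exact h y h1
          · simp at h1; subst h1; exact hx)]
        simp [hx, List.filter_cons]

-- B's loop is the same stable partition, by a direct accumulator induction
theorem loopB_inv (m offset : Int) (l : List Int) : ∀ (bg en : List Int),
    l.foldl (fun (st : List Int × List Int) x =>
      let y := x + offset
      if y > m then (st.1 ++ [y - m], st.2) else (st.1, st.2 ++ [y])) (bg, en)
    = (bg ++ ((l.map (fun x => x + offset)).filter (fun y => y > m)).map (fun y => y - m),
       en ++ (l.map (fun x => x + offset)).filter (fun y => ¬ y > m)) := by
  induction l with
  | nil => intro bg en; simp
  | cons x l ih =>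
      intro bg en
      by_cases hx : x + offset > m
      · simp only [List.foldl_cons, if_pos hx, ih]
        simp [hx]
      · simp only [List.foldl_cons, if_neg hx, ih]
        simp [hx, List.filter_cons]

-- ===== VERDICT (by name: the statement is the Claim_ definition above) =====
theorem apply_offset_spec : Claim_equal_apply_offset := by
  intro lst offset list2 _ _
  unfold Spec_apply_offset
  simp only [apply_offset, apply_offset_alt]
  have hA := loopA_inv ((PySem.List.max? lst (fun x => x)).getD 0)
    (lst.map (fun x => x + offset)) [] [] (by simp)
  have hB := loopB_inv ((PySem.List.max? lst (fun x => x)).getD 0) offset lst [] []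
  simp only [List.nil_append] at hA hB
  rw [hA, hB]
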